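-- pv_equiv track=rewrite | github.com/sue-jain/Shopify | recursive_multiply.py | recursive_multiply
-- ===== SOURCE A (Python) =====
-- def recursive_multiply(x, y):
--     """
--     Recursively multiply two positive integers x and y without using the * operator.
--     Uses Russian Peasant Multiplication for O(log y) recursion depth.
--     Args:
--         x (int): First positive integer
--         y (int): Second positive integer
--     Returns:
--         int: Product of x and y
--     """
--     if y == 0:
--         return 0
--     if y == 1:
--         return x
--     if y % 2 == 0:
--         return recursive_multiply(x + x, y // 2)
--     else:
--         return x + recursive_multiply(x, y - 1)
-- ===== SOURCE B (Python) =====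
-- def recursive_multiply(x, y):
--     """Iterative Russian peasant multiplication: accumulator loop instead of recursion."""
--     result = 0
--     while y > 0:
--         if y % 2 == 1:
--             result += x
--         x += x
--         y //= 2
--     return result
-- ===== Notes on version B (the rewrite author's own statement) =====
-- stated objective: alternative
-- what changed: Replaces the recursive halving/decrement scheme with an iterative while-loop threading an accumulator (add x when y is odd, double x, halve y).
import Mathlib
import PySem

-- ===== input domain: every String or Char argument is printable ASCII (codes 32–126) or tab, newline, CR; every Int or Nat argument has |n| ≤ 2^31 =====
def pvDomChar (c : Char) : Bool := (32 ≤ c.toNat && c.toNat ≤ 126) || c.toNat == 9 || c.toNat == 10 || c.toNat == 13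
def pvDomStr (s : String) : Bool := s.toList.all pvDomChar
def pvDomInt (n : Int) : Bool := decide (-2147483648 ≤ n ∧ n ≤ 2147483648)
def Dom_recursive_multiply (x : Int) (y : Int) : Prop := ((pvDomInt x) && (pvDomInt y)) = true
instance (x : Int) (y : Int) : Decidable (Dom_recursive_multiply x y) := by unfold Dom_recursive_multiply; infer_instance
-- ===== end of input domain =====

-- B replaces A's recursion with an iterative accumulator loop (same O(log y) cost, different decomposition).

-- ===== PORT A =====
-- A's recursion diverges for y < 0 in Python; the fuel only makes the same
-- computation total in Lean (for y ≥ 0, fuel y.toNat + 1 is never exhausted).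
def recursive_multiplyFuel (fuel : Nat) (x : Int) (y : Int) : Int :=
  match fuel with
  | 0 => 0
  | fuel + 1 =>
    if y = 0 then 0
    else if y = 1 then x
    else if PySem.Int.mod y 2 = 0 then
      recursive_multiplyFuel fuel (x + x) (PySem.Int.floordiv y 2)
    else
      x + recursive_multiplyFuel fuel x (y - 1)

def recursive_multiply (x : Int) (y : Int) : Int :=
  recursive_multiplyFuel (y.toNat + 1) x y

-- ===== PORT B =====
-- the while-loop of Source B, state (result, x, y)
def recursive_multiply_altLoop (result : Int) (x : Int) (y : Int) : Int :=
  if h : 0 < y then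
    recursive_multiply_altLoop (if PySem.Int.mod y 2 = 1 then result + x else result)
      (x + x) (PySem.Int.floordiv y 2)
  else result
termination_by y.toNat
decreasing_by
  rw [PySem.Int.floordiv_eq_ediv_of_pos (by omega : (0:Int) < 2)]
  omega

def recursive_multiply_alt (x : Int) (y : Int) : Int :=
  recursive_multiply_altLoop 0 x y

-- ===== PRECONDITION & SPEC =====
-- Pre_ excludes y < 0, on which Python A recurses forever (RecursionError).
def Pre_recursive_multiply (x : Int) (y : Int) : Prop := 0 ≤ y
instance (x : Int) (y : Int) : Decidable (Pre_recursive_multiply x y) := by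
  unfold Pre_recursive_multiply; infer_instance

def pvWitness_recursive_multiply : Int × Int := (7, 12)

def Spec_recursive_multiply (x : Int) (y : Int) (out : Int) : Prop := out = recursive_multiply_alt x y
instance (x : Int) (y : Int) (out : Int) : Decidable (Spec_recursive_multiply x y out) := by
  unfold Spec_recursive_multiply; infer_instance

-- ===== CLAIM (what is proved, stated in full; the proofs are below) =====
def Claim_equal_recursive_multiply : Prop := ∀ (x : Int) (y : Int), Dom_recursive_multiply x y → Pre_recursive_multiply x y → Spec_recursive_multiply x y (recursive_multiply x y)

-- ===== LEMMAS AND PROOFS =====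

-- A's fuel recursion computes x * y once the fuel exceeds y
theorem recursive_multiplyFuel_eq (fuel : Nat) :
    ∀ (x y : Int), 0 ≤ y → y < fuel → recursive_multiplyFuel fuel x y = x * y := by
  induction fuel with
  | zero => intro x y hy hlt; omega
  | succ n ih =>
    intro x y hy hlt
    rw [recursive_multiplyFuel]
    split_ifs with h0 h1 h2
    · simp [h0]
    · simp [h1]
    · rw [PySem.Int.floordiv_eq_ediv_of_pos (by omega : (0:Int) < 2)]
      rw [PySem.Int.mod_eq_emod_of_pos (by omega : (0:Int) < 2)] at h2
      rw [ih (x + x) (y / 2) (by omega) (by omega)]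
      have : y = 2 * (y / 2) := by omega
      linear_combination (-x) * this
    · rw [ih x (y - 1) (by omega) (by omega)]
      ring

theorem recursive_multiply_eq_mul (x y : Int) (hy : 0 ≤ y) :
    recursive_multiply x y = x * y := by
  unfold recursive_multiply
  exact recursive_multiplyFuel_eq _ x y hy (by omega)

-- loop invariant: the accumulator plus x*y is preserved
theorem recursive_multiply_altLoop_eq (n : Nat) :
    ∀ (result x y : Int), y.toNat = n → 0 ≤ y →
      recursive_multiply_altLoop result x y = result + x * y := by
  induction n using Nat.strong_induction_on with
  | _ n ih =>
    intro result x y hn hy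
    rw [recursive_multiply_altLoop]
    split_ifs with h hodd
    · rw [PySem.Int.floordiv_eq_ediv_of_pos (by omega : (0:Int) < 2)]
      rw [PySem.Int.mod_eq_emod_of_pos (by omega : (0:Int) < 2)] at hodd
      rw [ih (y / 2).toNat (by omega) _ _ _ rfl (by omega)]
      have h2 : y = 2 * (y / 2) + 1 := by omega
      linear_combination (-x) * h2
    · rw [PySem.Int.floordiv_eq_ediv_of_pos (by omega : (0:Int) < 2)]
      rw [PySem.Int.mod_eq_emod_of_pos (by omega : (0:Int) < 2)] at hodd
      rw [ih (y / 2).toNat (by omega) _ _ _ rfl (by omega)]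
      have h2 : y = 2 * (y / 2) := by omega
      linear_combination (-x) * h2
    · have hz : y = 0 := by omega
      subst hz; ring

theorem recursive_multiply_alt_eq_mul (x y : Int) (hy : 0 ≤ y) :
    recursive_multiply_alt x y = x * y := by
  unfold recursive_multiply_alt
  rw [recursive_multiply_altLoop_eq y.toNat 0 x y rfl hy]
  ring

-- ===== VERDICT (by name: the statement is the Claim_ definition above) =====
theorem recursive_multiply_spec : Claim_equal_recursive_multiply := by
  intro x y _ hpre
  unfold Spec_recursive_multiply
  rw [recursive_multiply_eq_mul x y hpre, recursive_multiply_alt_eq_mul x y hpre]
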